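-- pv_equiv track=rewrite | github.com/jshimbo/adventofcode | 2021/03-b.py | next_bit
-- ===== SOURCE A (Python) =====
-- def next_bit(lines, index, oxygen):
--     ones = []
--     zeros = []
--     for line in lines:
--         if line[index] == "1":
--             ones.append(line)
--         else:
--             zeros.append(line)
--
--     if oxygen:
--         if len(ones) < len(zeros):
--             result = zeros
--         else:
--             result = ones
--     else:  # CO2
--         if len(ones) >= len(zeros):
--             result = zeros
--         else:
--             result = ones
--
--     return(result)
-- ===== SOURCE B (Python) =====
-- def next_bit(lines, index, oxygen):
--     c1 = sum(1 for line in lines if line[index] == "1")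
--     keep_ones = (2 * c1 >= len(lines)) == bool(oxygen)
--     return [line for line in lines if (line[index] == "1") == keep_ones]
-- ===== Notes on version B (the rewrite author's own statement) =====
-- stated objective: simpler
-- what changed: B keeps only a scalar count of '1'-bits and a derived keep-ones flag instead of materialising two partition lists, then filters the input once.
import Mathlib
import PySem

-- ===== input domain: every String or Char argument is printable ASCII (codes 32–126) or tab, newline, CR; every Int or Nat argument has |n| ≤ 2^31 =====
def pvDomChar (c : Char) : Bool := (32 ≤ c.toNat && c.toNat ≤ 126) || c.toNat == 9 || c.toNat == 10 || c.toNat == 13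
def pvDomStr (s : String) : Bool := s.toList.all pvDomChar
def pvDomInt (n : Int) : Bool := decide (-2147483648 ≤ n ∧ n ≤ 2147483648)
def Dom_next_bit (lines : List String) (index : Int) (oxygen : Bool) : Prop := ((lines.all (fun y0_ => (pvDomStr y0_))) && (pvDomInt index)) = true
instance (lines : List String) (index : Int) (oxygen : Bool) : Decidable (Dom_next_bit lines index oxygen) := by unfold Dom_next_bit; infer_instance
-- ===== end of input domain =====

-- B keeps a scalar count of '1'-bits and a derived keep-ones flag instead of two partition lists, then filters once (objective: simpler).

-- ===== PORT A =====
def next_bit (lines : List String) (index : Int) (oxygen : Bool) : List String :=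
  let p := lines.foldl
    (fun (s : List String × List String) line =>
      if PySem.Str.pyGet? line index == some '1' then (s.1 ++ [line], s.2)
      else (s.1, s.2 ++ [line]))
    ([], [])
  if oxygen then
    if p.1.length < p.2.length then p.2 else p.1
  else
    if p.1.length ≥ p.2.length then p.2 else p.1

-- ===== PORT B =====
def next_bit_alt (lines : List String) (index : Int) (oxygen : Bool) : List String :=
  let c1 := lines.countP (fun line => PySem.Str.pyGet? line index == some '1')
  let keepOnes := (decide (2 * c1 ≥ lines.length)) == oxygen
  lines.filter (fun line => (PySem.Str.pyGet? line index == some '1') == keepOnes)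

-- ===== PRECONDITION & SPEC =====
-- Pre_ excludes exactly the inputs where Python A raises IndexError: some line has no character at `index`.
def Pre_next_bit (lines : List String) (index : Int) (oxygen : Bool) : Prop :=
  ∀ line ∈ lines, (PySem.Str.pyGet? line index).isSome = true
instance (lines : List String) (index : Int) (oxygen : Bool) : Decidable (Pre_next_bit lines index oxygen) := by unfold Pre_next_bit; infer_instance
def pvWitness_next_bit : List String × Int × Bool := (["10", "01", "11"], 0, true)

def Spec_next_bit (lines : List String) (index : Int) (oxygen : Bool) (out : List String) : Prop := out = next_bit_alt lines index oxygen
instance (lines : List String) (index : Int) (oxygen : Bool) (out : List String) : Decidable (Spec_next_bit lines index oxygen out) := by unfold Spec_next_bit; infer_instance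

-- ===== CLAIM (what is proved, stated in full; the proofs are below) =====
def Claim_equal_next_bit : Prop := ∀ (lines : List String) (index : Int) (oxygen : Bool), Dom_next_bit lines index oxygen → Pre_next_bit lines index oxygen → Spec_next_bit lines index oxygen (next_bit lines index oxygen)

-- ===== LEMMAS AND PROOFS =====

-- The partition fold equals (accumulated ones ++ filter p, accumulated zeros ++ filter ¬p).
theorem pv_fold_partition (p : String → Bool) (lines : List String) (a b : List String) :
    lines.foldl
      (fun (s : List String × List String) line =>
        if p line then (s.1 ++ [line], s.2) else (s.1, s.2 ++ [line])) (a, b)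
    = (a ++ lines.filter p, b ++ lines.filter (fun l => !p l)) := by
  induction lines generalizing a b with
  | nil => simp
  | cons x xs ih =>
    by_cases h : p x <;> simp [h, ih]

theorem pv_len_split (p : String → Bool) (lines : List String) :
    (lines.filter p).length + (lines.filter (fun l => !p l)).length = lines.length := by
  induction lines with
  | nil => simp
  | cons x xs ih => by_cases h : p x <;> simp [h] <;> omega

-- A's choice between the two partition lists equals B's single filter with the derived keep-ones flag.
theorem pv_main (p : String → Bool) (lines : List String) (oxygen : Bool) :
    (if oxygen then
       if (lines.filter p).length < (lines.filter (fun l => !p l)).length then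
         lines.filter (fun l => !p l)
       else lines.filter p
     else
       if (lines.filter p).length ≥ (lines.filter (fun l => !p l)).length then
         lines.filter (fun l => !p l)
       else lines.filter p)
    = lines.filter (fun l => p l == ((decide (2 * lines.countP p ≥ lines.length)) == oxygen)) := by
  have hlen := pv_len_split p lines
  have hc1 : lines.countP p = (lines.filter p).length := List.countP_eq_length_filter ..
  by_cases hk : 2 * lines.countP p ≥ lines.length <;>
    rcases oxygen with _ | _ <;>
      simp only [hk, decide_true, decide_false, BEq.rfl, Bool.not_true, if_true, if_false,
        Bool.false_eq_true, beq_true, beq_false] <;>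
    split_ifs <;>
    first
      | rfl
      | (exfalso; omega)

-- ===== VERDICT (by name: the statement is the Claim_ definition above) =====
theorem next_bit_spec : Claim_equal_next_bit := by
  intro lines index oxygen _ _
  unfold Spec_next_bit next_bit next_bit_alt
  simp only []
  rw [pv_fold_partition (fun line => PySem.Str.pyGet? line index == some '1') lines [] []]
  simp only [List.nil_append]
  exact pv_main (fun line => PySem.Str.pyGet? line index == some '1') lines oxygen
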